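-- pv_equiv track=rewrite | github.com/caiocrm/469 | bruteforce_matrix_pos.py | chunk_by_fixed_width
-- ===== SOURCE A (Python) =====
-- from typing import Any, Dict, Iterable, List, Optional, Sequence, Tuple
--
-- def chunk_by_fixed_width(digits: str, width: int, offset: int = 0, stop_at_boundaries: Optional[List[int]] = None) -> List[str]:
--     if width <= 0:
--         return []
--     out: List[str] = []
--     i = offset
--     boundary_set = set(stop_at_boundaries or [])
--     L = len(digits)
--     while i + width <= L:
--         if stop_at_boundaries:
--             internal = [b for b in boundary_set if i < b < i+width]
--             if internal:
--                 i = min(internal)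
--                 continue
--         out.append(digits[i:i+width])
--         i += width
--     return out
-- ===== SOURCE B (Python) =====
-- from typing import List, Optional
--
-- def chunk_by_fixed_width(digits: str, width: int, offset: int = 0, stop_at_boundaries: Optional[List[int]] = None) -> List[str]:
--     if width <= 0:
--         return []
--     bnds = sorted(set(stop_at_boundaries)) if stop_at_boundaries else []
--     n = len(bnds)
--     L = len(digits)
--     out: List[str] = []
--     i = offset
--     j = 0
--     while i + width <= L:
--         while j < n and bnds[j] <= i:
--             j += 1
--         if j < n and bnds[j] < i + width:
--             i = bnds[j]
--         else:
--             out.append(digits[i:i+width])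
--             i += width
--     return out
-- ===== Notes on version B (the rewrite author's own statement) =====
-- stated objective: alternative
-- what changed: A rescans the whole boundary set and takes its min on every loop step; B sorts the distinct boundaries once and walks a forward-only pointer through the sorted list, so each boundary is examined at most once across the whole loop.
import Mathlib
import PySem

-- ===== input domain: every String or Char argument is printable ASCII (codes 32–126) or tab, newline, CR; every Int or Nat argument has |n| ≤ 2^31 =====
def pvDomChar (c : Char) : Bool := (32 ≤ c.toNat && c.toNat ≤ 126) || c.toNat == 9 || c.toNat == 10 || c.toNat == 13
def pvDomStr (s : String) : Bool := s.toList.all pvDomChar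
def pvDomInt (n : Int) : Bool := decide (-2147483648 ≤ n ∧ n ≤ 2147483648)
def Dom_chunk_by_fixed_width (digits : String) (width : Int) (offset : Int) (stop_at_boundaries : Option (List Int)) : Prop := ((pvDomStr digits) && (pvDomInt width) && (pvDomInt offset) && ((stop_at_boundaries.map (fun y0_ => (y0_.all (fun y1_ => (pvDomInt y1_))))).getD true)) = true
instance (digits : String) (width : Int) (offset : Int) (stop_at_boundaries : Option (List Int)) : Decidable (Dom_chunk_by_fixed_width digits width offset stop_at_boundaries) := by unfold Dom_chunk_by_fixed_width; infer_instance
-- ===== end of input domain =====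

-- B replaces A's per-step rescan-and-min over the boundary set by one sort of the distinct
-- boundaries plus a forward-only pointer (objective: alternative algorithm; each boundary is
-- examined at most once across the whole loop instead of on every step).

-- ===== PORT A =====

-- the jump target A takes: min([b for b in boundary_set if i < b < i+width]) (used only when the filter is nonempty)
def pvJumpA (S : List Int) (i width : Int) : Int :=
  (PySem.List.min? (S.filter (fun b => decide (i < b) && decide (b < i + width))) (fun x => x)).getD 0

-- termination fact for A's 'continue' branch (cited by pvLoopA's decreasing_by)
theorem pvJumpA_lt (S : List Int) (i width : Int)
    (h : S.filter (fun b => decide (i < b) && decide (b < i + width)) ≠ []) :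
    i < pvJumpA S i width ∧ pvJumpA S i width < i + width := by
  unfold pvJumpA
  cases e : PySem.List.min? (S.filter (fun b => decide (i < b) && decide (b < i + width))) (fun x => x) with
  | none => exact absurd ((PySem.List.min?_eq_none_iff _ _).mp e) h
  | some m =>
    have hm := PySem.List.min?_mem e
    simp only [List.mem_filter, Bool.and_eq_true, decide_eq_true_eq] at hm
    simpa using hm.2

-- the 'while i + width <= L' loop of A, state (i, out)
def pvLoopA (digits : String) (width L : Int) (hw : 1 ≤ width) (S : List Int) (useB : Bool)
    (i : Int) (out : List String) : List String :=
  if _h : i + width ≤ L then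
    if hb : useB = true ∧ S.filter (fun b => decide (i < b) && decide (b < i + width)) ≠ [] then
      pvLoopA digits width L hw S useB (pvJumpA S i width) out
    else
      pvLoopA digits width L hw S useB (i + width) (out ++ [PySem.Str.slice digits (some i) (some (i + width))])
  else out
termination_by (L - i).toNat
decreasing_by
  · have := pvJumpA_lt S i width hb.2; omega
  · omega

def chunk_by_fixed_width (digits : String) (width : Int) (offset : Int) (stop_at_boundaries : Option (List Int)) : List String :=
  if hw : width ≤ 0 then []
  else
    pvLoopA digits width (PySem.Str.len digits) (by omega)
      (PySem.Set.ofList (stop_at_boundaries.getD []))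
      (!(stop_at_boundaries.getD []).isEmpty) offset []

-- ===== PORT B =====

-- the inner 'while j < n and bnds[j] <= i: j += 1' (the getD default is never read: the test guards j < length)
def pvSkipB (bnds : List Int) (i : Int) (j : Nat) : Nat :=
  if j < bnds.length ∧ bnds.getD j 0 ≤ i then pvSkipB bnds i (j + 1) else j
termination_by bnds.length - j
decreasing_by omega

-- exit condition of the inner while (cited by pvLoopB's decreasing_by and by the proofs)
theorem pvSkipB_exit (bnds : List Int) (i : Int) (j : Nat) :
    ¬ (pvSkipB bnds i j < bnds.length ∧ bnds.getD (pvSkipB bnds i j) 0 ≤ i) := by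
  unfold pvSkipB
  split
  · exact pvSkipB_exit bnds i (j + 1)
  · assumption
termination_by bnds.length - j
decreasing_by omega

-- the outer while loop of B, state (i, j, out)
def pvLoopB (digits : String) (width L : Int) (hw : 1 ≤ width) (bnds : List Int)
    (i : Int) (j : Nat) (out : List String) : List String :=
  if h : i + width ≤ L then
    let j' := pvSkipB bnds i j
    if hj : j' < bnds.length ∧ bnds.getD j' 0 < i + width then
      pvLoopB digits width L hw bnds (bnds.getD j' 0) j' out
    else
      pvLoopB digits width L hw bnds (i + width) j' (out ++ [PySem.Str.slice digits (some i) (some (i + width))])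
  else out
termination_by (L - i).toNat
decreasing_by
  · have := pvSkipB_exit bnds i j; omega
  · omega

def chunk_by_fixed_width_alt (digits : String) (width : Int) (offset : Int) (stop_at_boundaries : Option (List Int)) : List String :=
  if hw : width ≤ 0 then []
  else
    pvLoopB digits width (PySem.Str.len digits) (by omega)
      (if (stop_at_boundaries.getD []).isEmpty then []
       else PySem.List.sorted (PySem.Set.ofList (stop_at_boundaries.getD [])) (fun x => x) false)
      offset 0 []

-- ===== PRECONDITION & SPEC =====
def Spec_chunk_by_fixed_width (digits : String) (width : Int) (offset : Int) (stop_at_boundaries : Option (List Int)) (out : List String) : Prop := out = chunk_by_fixed_width_alt digits width offset stop_at_boundaries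
instance (digits : String) (width : Int) (offset : Int) (stop_at_boundaries : Option (List Int)) (out : List String) : Decidable (Spec_chunk_by_fixed_width digits width offset stop_at_boundaries out) := by unfold Spec_chunk_by_fixed_width; infer_instance

-- ===== CLAIM (what is proved, stated in full; the proofs are below) =====
def Claim_equal_chunk_by_fixed_width : Prop := ∀ (digits : String) (width : Int) (offset : Int) (stop_at_boundaries : Option (List Int)), Dom_chunk_by_fixed_width digits width offset stop_at_boundaries → Spec_chunk_by_fixed_width digits width offset stop_at_boundaries (chunk_by_fixed_width digits width offset stop_at_boundaries)

-- ===== LEMMAS AND PROOFS =====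

-- all entries strictly before pvSkipB bnds i j are ≤ i, given that all entries before j are
theorem pvSkipB_le (bnds : List Int) (i : Int) (j : Nat)
    (hinv : ∀ k : Nat, k < j → (hk : k < bnds.length) → bnds[k] ≤ i) :
    ∀ k : Nat, k < pvSkipB bnds i j → (hk : k < bnds.length) → bnds[k] ≤ i := by
  unfold pvSkipB
  split
  · next h =>
    exact pvSkipB_le bnds i (j + 1) (by
      intro k hkj hk
      rcases Nat.lt_or_ge k j with hlt | hge
      · exact hinv k hlt hk
      · have hkeq : k = j := by omega
        subst hkeq
        have := h.2
        rwa [List.getD_eq_getElem bnds 0 hk] at this)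
  · intro k hkj hk; exact hinv k hkj hk
termination_by bnds.length - j
decreasing_by omega

-- main step lemma: under the pointer invariant the two loops compute the same list
theorem pvLoop_eq (digits : String) (width L : Int) (hw : 1 ≤ width)
    (S bnds : List Int) (useB : Bool)
    (hperm : bnds.Perm S) (hsort : bnds.Pairwise (· < ·))
    (huse : useB = false → S = [])
    (i : Int) (j : Nat) (out : List String)
    (hinv : ∀ k : Nat, k < j → (hk : k < bnds.length) → bnds[k] ≤ i) :
    pvLoopA digits width L hw S useB i out = pvLoopB digits width L hw bnds i j out := by
  rw [pvLoopA, pvLoopB]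
  by_cases h : i + width ≤ L
  · simp only [dif_pos h]
    set j' := pvSkipB bnds i j with hj'
    have hexit := pvSkipB_exit bnds i j
    rw [← hj'] at hexit
    have hle : ∀ k : Nat, k < j' → (hk : k < bnds.length) → bnds[k] ≤ i :=
      pvSkipB_le bnds i j hinv
    have hmemS : ∀ x, x ∈ S ↔ x ∈ bnds := fun x => (hperm.mem_iff).symm
    by_cases hjc : j' < bnds.length ∧ bnds.getD j' 0 < i + width
    · -- B jumps; show A jumps to the same target
      have hjn : j' < bnds.length := hjc.1
      have hgd : bnds.getD j' 0 = bnds[j']'hjn := List.getD_eq_getElem bnds 0 hjn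
      have hgt : i < bnds[j']'hjn := by
        by_contra hc
        exact hexit ⟨hjn, by rw [hgd]; omega⟩
      have hjw : bnds[j']'hjn < i + width := by rw [← hgd]; exact hjc.2
      have hmemf : bnds[j']'hjn ∈ S.filter (fun b => decide (i < b) && decide (b < i + width)) := by
        simp only [List.mem_filter, Bool.and_eq_true, decide_eq_true_eq]
        exact ⟨(hmemS _).mpr (List.getElem_mem hjn), hgt, hjw⟩
      have hne : S.filter (fun b => decide (i < b) && decide (b < i + width)) ≠ [] :=
        List.ne_nil_of_mem hmemf
      have huseT : useB = true := by
        cases useB with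
        | true => rfl
        | false =>
          exfalso
          have hS : S = [] := huse rfl
          rw [hS] at hmemf; simp at hmemf
      have hmin : pvJumpA S i width = bnds[j']'hjn := by
        unfold pvJumpA
        cases e : PySem.List.min? (S.filter (fun b => decide (i < b) && decide (b < i + width))) (fun x => x) with
        | none => exact absurd ((PySem.List.min?_eq_none_iff _ _).mp e) hne
        | some m =>
          simp only [Option.getD_some]
          have hmmem := PySem.List.min?_mem e
          have hmmin := PySem.List.min?_isMin e
          have h1 : m ≤ bnds[j']'hjn := hmmin _ hmemf
          have h2 : bnds[j']'hjn ≤ m := by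
            simp only [List.mem_filter, Bool.and_eq_true, decide_eq_true_eq] at hmmem
            obtain ⟨hmS, hmi, hmw⟩ := hmmem
            have hmb : m ∈ bnds := (hmemS m).mp hmS
            obtain ⟨k, hk, hkm⟩ := List.getElem_of_mem hmb
            have hkge : j' ≤ k := by
              by_contra hc
              have := hle k (by omega) hk
              omega
            rcases Nat.eq_or_lt_of_le hkge with heq | hlt
            · subst hkm; subst heq; omega
            · have := List.pairwise_iff_getElem.mp hsort j' k hjn hk hlt
              omega
          omega
      rw [dif_pos ⟨huseT, hne⟩, dif_pos hjc, hmin, ← hgd]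
      exact pvLoop_eq digits width L hw S bnds useB hperm hsort huse _ j' out
        (by intro k hkj hk
            have := hle k hkj hk
            rw [hgd]; omega)
    · -- B chunks; show A must chunk too
      have hAempty : ¬ (useB = true ∧ S.filter (fun b => decide (i < b) && decide (b < i + width)) ≠ []) := by
        rintro ⟨hu, hne⟩
        obtain ⟨x, hx⟩ := List.exists_mem_of_ne_nil _ hne
        simp only [List.mem_filter, Bool.and_eq_true, decide_eq_true_eq] at hx
        obtain ⟨hxS, hxi, hxw⟩ := hx
        have hxb : x ∈ bnds := (hmemS x).mp hxS
        obtain ⟨k, hk, hkm⟩ := List.getElem_of_mem hxb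
        have hkge : j' ≤ k := by
          by_contra hc
          have := hle k (by omega) hk
          omega
        have hjn : j' < bnds.length := by omega
        have hb : bnds[j']'hjn ≤ x := by
          rcases Nat.eq_or_lt_of_le hkge with heq | hlt
          · subst hkm; subst heq; omega
          · have := List.pairwise_iff_getElem.mp hsort j' k hjn hk hlt
            omega
        exact hjc ⟨hjn, by rw [List.getD_eq_getElem bnds 0 hjn]; omega⟩
      rw [dif_neg hAempty, dif_neg hjc]
      exact pvLoop_eq digits width L hw S bnds useB hperm hsort huse _ j' _
        (by intro k hkj hk; have := hle k hkj hk; omega)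
  · simp only [dif_neg h]
termination_by (L - i).toNat
decreasing_by
  · have hexit := pvSkipB_exit bnds i j
    have hjn := hjc.1
    have := hjc.2
    rw [List.getD_eq_getElem bnds 0 hjn] at this ⊢
    rw [List.getD_eq_getElem bnds 0 hjn] at hexit
    omega
  · omega

-- ===== VERDICT (by name: the statement is the Claim_ definition above) =====
theorem chunk_by_fixed_width_spec : Claim_equal_chunk_by_fixed_width := by
  intro digits width offset sab _
  unfold Spec_chunk_by_fixed_width chunk_by_fixed_width chunk_by_fixed_width_alt
  by_cases hw : width ≤ 0
  · simp [hw]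
  · simp only [dif_neg hw]
    by_cases he : (sab.getD []).isEmpty
    · have hnil : sab.getD [] = [] := List.isEmpty_iff.mp he
      refine pvLoop_eq _ _ _ _ _ _ _ ?_ ?_ ?_ _ _ _ ?_
      · simp [hnil, PySem.Set.ofList]
      · simp [he]
      · intro _; simp [hnil, PySem.Set.ofList]
      · simp [he]
    · refine pvLoop_eq _ _ _ _ _ _ _ ?_ ?_ ?_ _ _ _ ?_
      · simp only [he]
        exact PySem.List.sorted_perm _ _ _
      · simp only [he]
        exact PySem.List.sorted_ofList_pairwise_lt _
      · intro hfalse; simp [he] at hfalse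
      · intro k hk; omega
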